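-- pv_equiv track=rewrite | github.com/albancolley/aoc | aoc2023/12/task.py | get_group_start_positions
-- ===== SOURCE A (Python) =====
-- def get_group_start_positions(depth, position, line, groups):
--     line_length = len(line)
--
--     if depth == 3 and position == 11:
--         pass
--
--     if position >= line_length:
--         return []
--
--     remaining_groups = groups[depth:]
--     current_group_length = remaining_groups[0]
--     min_length = sum(remaining_groups) + len(remaining_groups) - 1
--     end_position = line_length - min_length
--
--     group_start_positions = []
--     for i in range(end_position, position -1, -1):
--         is_group = True
--
--         if '#' in line[position: i]:
--             continue
--
--         if i > 0 and line[i-1] == '#':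
--             continue
--
--         for j in range(current_group_length):
--             if line[i+j] == '.':
--                 is_group = False
--                 break
--
--         if is_group:
--             if i + j == line_length - 1:
--                 group_start_positions.append(i)
--             elif line[i + j + 1] != '#':
--                 group_start_positions.append(i)
--
--     return group_start_positions
-- ===== SOURCE B (Python) =====
-- def _scan_counts(line):
--     # one pass: prefix counts of '#' and '.'
--     hashes = [0]
--     dots = [0]
--     h = d = 0
--     for c in line:
--         if c == '#':
--             h += 1
--         if c == '.':
--             d += 1
--         hashes.append(h)
--         dots.append(d)
--     return hashes, dots
--
--
-- def get_group_start_positions(depth, position, line, groups):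
--     n = len(line)
--
--     if position >= n:
--         return []
--
--     remaining = groups[depth:]
--     g = remaining[0]
--     end = n - (sum(remaining) + len(remaining) - 1)
--
--     hashes, dots = _scan_counts(line)
--
--     result = []
--     for i in range(end, position - 1, -1):
--         if hashes[i] - hashes[position] > 0:
--             continue
--         if i > 0 and line[i - 1] == '#':
--             continue
--         if dots[i + g] - dots[i] > 0:
--             continue
--         if i + g < n and line[i + g] == '#':
--             continue
--         result.append(i)
--     return result
-- ===== Notes on version B (the rewrite author's own statement) =====
-- stated objective: alternative
-- what changed: B precomputes prefix counts of '#' and '.' in one pass over the line, replacing A's per-candidate substring scan ('#' in line[position:i]) and inner character loop with O(1) arithmetic window checks.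
-- outside the precondition, e.g. on get_group_start_positions(0, -1, '.', [1]): A returns [], B returns [-1]; on get_group_start_positions(1, 1, '##', [1, 0]): A returns [], B returns []
import Mathlib
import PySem

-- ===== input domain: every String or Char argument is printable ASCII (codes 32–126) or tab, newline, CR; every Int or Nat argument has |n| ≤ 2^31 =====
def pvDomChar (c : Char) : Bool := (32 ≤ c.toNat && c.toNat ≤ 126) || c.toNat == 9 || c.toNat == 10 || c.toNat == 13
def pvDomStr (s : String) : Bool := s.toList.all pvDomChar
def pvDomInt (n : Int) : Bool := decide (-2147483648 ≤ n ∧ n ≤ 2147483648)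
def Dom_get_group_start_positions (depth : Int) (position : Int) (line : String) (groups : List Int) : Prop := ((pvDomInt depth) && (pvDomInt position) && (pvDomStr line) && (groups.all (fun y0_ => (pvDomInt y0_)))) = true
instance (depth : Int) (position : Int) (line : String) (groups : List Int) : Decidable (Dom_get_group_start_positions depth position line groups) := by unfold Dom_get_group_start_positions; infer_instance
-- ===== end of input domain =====

-- B replaces A's per-candidate substring scan and inner character loop with two prefix-count
-- arrays built in one pass over the line, making every per-candidate check O(1) (objective:
-- alternative — fewer character comparisons asymptotically, but not measured faster here).

-- ===== PORT A =====
-- 'for j in range(current_group_length): if line[i+j] == ".": is_group = False; break'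
-- returns (is_group, the final value of j); jcur tracks the last value j took (Python's j leaks
-- out of the loop).  Under Pre_ every index the Python reads is in range, so pyGetD is exact.
def pvAInner (cs : List Char) (i : Int) : List Int → Int → Bool × Int
  | [], jcur => (true, jcur)
  | j :: rest, _ => if PySem.List.pyGetD cs (i + j) '?' = '.' then (false, j) else pvAInner cs i rest j

def get_group_start_positions (depth : Int) (position : Int) (line : String) (groups : List Int) : List Int :=
  let cs := line.toList
  let line_length : Int := cs.length
  if position ≥ line_length then []
  else
    let remaining_groups := PySem.List.slice groups (some depth) none
    let current_group_length := PySem.List.pyGetD remaining_groups 0 0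
    let min_length := remaining_groups.sum + (remaining_groups.length : Int) - 1
    let end_position := line_length - min_length
    (PySem.List.pyRange end_position (position - 1) (-1)).foldl (fun acc i =>
      if '#' ∈ PySem.List.slice cs (some position) (some i) then acc
      else if i > 0 ∧ PySem.List.pyGetD cs (i - 1) '?' = '#' then acc
      else
        let r := pvAInner cs i (PySem.List.pyRange 0 current_group_length 1) (-1)
        if r.1 then
          if i + r.2 = line_length - 1 then acc ++ [i]
          else if ¬ (PySem.List.pyGetD cs (i + r.2 + 1) '?' = '#') then acc ++ [i]
          else acc
        else acc) []

-- ===== PORT B =====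
-- the body of _scan_counts' loop: state ((hashes, dots), h, d), one step per character
def pvBStep : ((List Int × List Int) × Int × Int) → Char → ((List Int × List Int) × Int × Int) :=
  fun st c =>
    let h := if c == '#' then st.2.1 + 1 else st.2.1
    let d := if c == '.' then st.2.2 + 1 else st.2.2
    ((st.1.1 ++ [h], st.1.2 ++ [d]), h, d)

-- _scan_counts(line): prefix counts of '#' and '.' built in one pass
def pvScanCounts (cs : List Char) : List Int × List Int :=
  (cs.foldl pvBStep (([0], [0]), 0, 0)).1

def get_group_start_positions_alt (depth : Int) (position : Int) (line : String) (groups : List Int) : List Int :=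
  let cs := line.toList
  let n : Int := cs.length
  if position ≥ n then []
  else
    let remaining := PySem.List.slice groups (some depth) none
    let g := PySem.List.pyGetD remaining 0 0
    let endPos := n - (remaining.sum + (remaining.length : Int) - 1)
    let hashes := (pvScanCounts cs).1
    let dots := (pvScanCounts cs).2
    (PySem.List.pyRange endPos (position - 1) (-1)).foldl (fun acc i =>
      if PySem.List.pyGetD hashes i 0 - PySem.List.pyGetD hashes position 0 > 0 then acc
      else if i > 0 ∧ PySem.List.pyGetD cs (i - 1) '?' = '#' then acc
      else if PySem.List.pyGetD dots (i + g) 0 - PySem.List.pyGetD dots i 0 > 0 then acc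
      else if i + g < n ∧ PySem.List.pyGetD cs (i + g) '?' = '#' then acc
      else acc ++ [i]) []

-- ===== PRECONDITION & SPEC =====
-- Pre_ restricts to the natural domain: nonnegative position and, unless the early
-- 'position >= len(line)' return fires (kept for every depth/groups), depth a valid index into
-- groups with all remaining group lengths positive.  Outside it A either raises (IndexError on an
-- empty groups[depth:], UnboundLocalError on a nonpositive group length) or returns a value via
-- Python's negative-index wraparound.
def Pre_get_group_start_positions (depth : Int) (position : Int) (line : String) (groups : List Int) : Prop :=
  0 ≤ position ∧
    ((line.toList.length : Int) ≤ position ∨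
      (0 ≤ depth ∧ depth < (groups.length : Int) ∧ ∀ x ∈ groups.drop depth.toNat, 1 ≤ x))
instance (depth : Int) (position : Int) (line : String) (groups : List Int) : Decidable (Pre_get_group_start_positions depth position line groups) := by unfold Pre_get_group_start_positions; infer_instance

def pvWitness_get_group_start_positions : Int × Int × String × List Int := (1, 0, "?#?.??", [2, 1, 1])

def Spec_get_group_start_positions (depth : Int) (position : Int) (line : String) (groups : List Int) (out : List Int) : Prop := out = get_group_start_positions_alt depth position line groups
instance (depth : Int) (position : Int) (line : String) (groups : List Int) (out : List Int) : Decidable (Spec_get_group_start_positions depth position line groups out) := by unfold Spec_get_group_start_positions; infer_instance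

-- ===== CLAIM (what is proved, stated in full; the proofs are below) =====
def Claim_equal_get_group_start_positions : Prop := ∀ (depth : Int) (position : Int) (line : String) (groups : List Int), Dom_get_group_start_positions depth position line groups → Pre_get_group_start_positions depth position line groups → Spec_get_group_start_positions depth position line groups (get_group_start_positions depth position line groups)

-- ===== LEMMAS AND PROOFS =====

theorem pvBFold_spec (cs : List Char) (ah ad : List Int) (h d : Int) :
    cs.foldl pvBStep ((ah, ad), h, d) =
      ((ah ++ (List.range cs.length).map (fun k => h + ((cs.take (k+1)).countP (· == '#') : Int)),
        ad ++ (List.range cs.length).map (fun k => d + ((cs.take (k+1)).countP (· == '.') : Int))),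
       h + (cs.countP (· == '#') : Int), d + (cs.countP (· == '.') : Int)) := by
  induction cs generalizing ah ad h d with
  | nil => simp
  | cons c cs ih =>
    simp only [List.foldl_cons]
    rw [show pvBStep ((ah, ad), h, d) c =
        ((ah ++ [if c == '#' then h + 1 else h], ad ++ [if c == '.' then d + 1 else d]),
         (if c == '#' then h + 1 else h), (if c == '.' then d + 1 else d)) from rfl]
    rw [ih]
    simp only [List.length_cons, List.range_succ_eq_map, List.map_cons, List.map_map,
      List.take_succ_cons, List.countP_cons, List.take_zero, List.countP_nil, Prod.mk.injEq]
    refine ⟨⟨?_, ?_⟩, ?_, ?_⟩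
    · rw [List.append_assoc]
      congr 1
      rw [List.singleton_append]
      congr 1
      · by_cases hc : c == '#' <;> simp [hc]
      · apply List.map_congr_left
        intro k _
        by_cases hc : c == '#' <;> simp [hc, Function.comp] <;> push_cast <;> ring
    · rw [List.append_assoc]
      congr 1
      rw [List.singleton_append]
      congr 1
      · by_cases hc : c == '.' <;> simp [hc]
      · apply List.map_congr_left
        intro k _
        by_cases hc : c == '.' <;> simp [hc, Function.comp] <;> push_cast <;> ring
    · by_cases hc : c == '#' <;> simp [hc] <;> push_cast <;> ring
    · by_cases hc : c == '.' <;> simp [hc] <;> push_cast <;> ring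

theorem pvBFold_fst (cs : List Char) :
    (pvScanCounts cs).1
      = (List.range (cs.length + 1)).map (fun k => ((cs.take k).countP (· == '#') : Int)) := by
  rw [pvScanCounts, pvBFold_spec]
  rw [List.range_succ_eq_map, List.map_cons, List.map_map]
  simp [Function.comp]

theorem pvBFold_snd (cs : List Char) :
    (pvScanCounts cs).2
      = (List.range (cs.length + 1)).map (fun k => ((cs.take k).countP (· == '.') : Int)) := by
  rw [pvScanCounts, pvBFold_spec]
  rw [List.range_succ_eq_map, List.map_cons, List.map_map]
  simp [Function.comp]

theorem pvHashes_get (cs : List Char) (m : Int) (h0 : 0 ≤ m) (h1 : m ≤ (cs.length : Int)) :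
    PySem.List.pyGetD (pvScanCounts cs).1 m 0
      = ((cs.take m.toNat).countP (· == '#') : Int) := by
  rw [pvBFold_fst]
  rw [PySem.List.pyGetD_eq_getElem _ _ h0 (by simp; omega)]
  simp

theorem pvDots_get (cs : List Char) (m : Int) (h0 : 0 ≤ m) (h1 : m ≤ (cs.length : Int)) :
    PySem.List.pyGetD (pvScanCounts cs).2 m 0
      = ((cs.take m.toNat).countP (· == '.') : Int) := by
  rw [pvBFold_snd]
  rw [PySem.List.pyGetD_eq_getElem _ _ h0 (by simp; omega)]
  simp

theorem pvCount_window (cs : List Char) (p : Char → Bool) (a b : Int) (h0 : 0 ≤ a) (hab : a ≤ b) :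
    ((cs.take b.toNat).countP p : Int) - ((cs.take a.toNat).countP p : Int)
      = (((cs.drop a.toNat).take (b.toNat - a.toNat)).countP p : Int) := by
  have h : b.toNat = a.toNat + (b.toNat - a.toNat) := by omega
  nth_rewrite 1 [h]
  rw [List.take_add, List.countP_append]
  push_cast
  ring

theorem pvMem_window (cs : List Char) (c : Char) (a : Int) (g : Int) (h0 : 0 ≤ a) :
    c ∈ (cs.drop a.toNat).take (g.toNat)
      ↔ ∃ j : Int, 0 ≤ j ∧ j < g ∧ cs[(a + j).toNat]? = some c := by
  rw [List.mem_iff_getElem?]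
  constructor
  · rintro ⟨k, hk⟩
    rw [List.getElem?_take] at hk
    by_cases hkg : k < g.toNat
    · rw [if_pos hkg, List.getElem?_drop] at hk
      refine ⟨(k : Int), by omega, by omega, ?_⟩
      have h2 : (a + (k : Int)).toNat = a.toNat + k := by omega
      rw [h2]; exact hk
    · rw [if_neg hkg] at hk; exact absurd hk (by simp)
  · rintro ⟨j, hj0, hjg, he⟩
    refine ⟨j.toNat, ?_⟩
    rw [List.getElem?_take, if_pos (by omega), List.getElem?_drop]
    have h2 : (a + j).toNat = a.toNat + j.toNat := by omega
    rw [← h2]; exact he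

theorem pvAInner_true_iff (cs : List Char) (i : Int) (js : List Int) (j0 : Int) :
    (pvAInner cs i js j0).1 = true ↔ ∀ j ∈ js, ¬ (PySem.List.pyGetD cs (i + j) '?' = '.') := by
  induction js generalizing j0 with
  | nil => simp [pvAInner]
  | cons j rest ih =>
    by_cases h : PySem.List.pyGetD cs (i + j) '?' = '.'
    · simp [pvAInner, h]
    · simp [pvAInner, h, ih]

theorem pvAInner_all (cs : List Char) (i : Int) (js : List Int) (j0 : Int)
    (h : ∀ j ∈ js, ¬ (PySem.List.pyGetD cs (i + j) '?' = '.')) :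
    pvAInner cs i js j0 = (true, js.getLastD j0) := by
  induction js generalizing j0 with
  | nil => simp [pvAInner]
  | cons j rest ih =>
    have hj := h j (by simp)
    rw [pvAInner, if_neg hj, ih _ (fun x hx => h x (by simp [hx]))]
    cases rest with
    | nil => simp
    | cons y ys =>
      obtain ⟨z, hz⟩ := Option.isSome_iff_exists.mp (List.getLast?_isSome.mpr (by simp) :
        (y :: ys).getLast?.isSome)
      simp [hz]

theorem pvLen_le_sum (l : List Int) (h : ∀ x ∈ l, 1 ≤ x) : (l.length : Int) ≤ l.sum := by
  induction l with
  | nil => simp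
  | cons x xs ih =>
    have := h x (by simp)
    have := ih (fun y hy => h y (by simp [hy]))
    simp only [List.length_cons, List.sum_cons]
    push_cast
    omega

-- loop bodies of A and B agree on every candidate i of the scanned range
theorem pvBody_eq (cs : List Char) (position g : Int) (i : Int) (acc : List Int)
    (hp0 : 0 ≤ position) (hpi : position ≤ i) (hg : 1 ≤ g)
    (hin : i + g ≤ (cs.length : Int)) :
    (if '#' ∈ PySem.List.slice cs (some position) (some i) then acc
     else if i > 0 ∧ PySem.List.pyGetD cs (i - 1) '?' = '#' then acc
     else
       let r := pvAInner cs i (PySem.List.pyRange 0 g 1) (-1)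
       if r.1 then
         if i + r.2 = (cs.length : Int) - 1 then acc ++ [i]
         else if ¬ (PySem.List.pyGetD cs (i + r.2 + 1) '?' = '#') then acc ++ [i]
         else acc
       else acc)
    = (if PySem.List.pyGetD (pvScanCounts cs).1 i 0 - PySem.List.pyGetD (pvScanCounts cs).1 position 0 > 0 then acc
       else if i > 0 ∧ PySem.List.pyGetD cs (i - 1) '?' = '#' then acc
       else if PySem.List.pyGetD (pvScanCounts cs).2 (i + g) 0 - PySem.List.pyGetD (pvScanCounts cs).2 i 0 > 0 then acc
       else if i + g < (cs.length : Int) ∧ PySem.List.pyGetD cs (i + g) '?' = '#' then acc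
       else acc ++ [i]) := by
  have hcond1 : ('#' ∈ PySem.List.slice cs (some position) (some i)) ↔
      (PySem.List.pyGetD (pvScanCounts cs).1 i 0 - PySem.List.pyGetD (pvScanCounts cs).1 position 0 > 0) := by
    rw [pvHashes_get cs i (by omega) (by omega), pvHashes_get cs position hp0 (by omega),
      pvCount_window cs (· == '#') position i hp0 hpi, PySem.List.slice_toNat cs hp0 (by omega)]
    simp only [gt_iff_lt, Int.natCast_pos, List.countP_pos_iff, beq_iff_eq, exists_eq_right]
  have hcond3 : (PySem.List.pyGetD (pvScanCounts cs).2 (i + g) 0 - PySem.List.pyGetD (pvScanCounts cs).2 i 0 > 0)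
      ↔ ('.' ∈ (cs.drop i.toNat).take g.toNat) := by
    rw [pvDots_get cs (i + g) (by omega) (by omega), pvDots_get cs i (by omega) (by omega),
      pvCount_window cs (· == '.') i (i + g) (by omega) (by omega),
      show (i + g).toNat - i.toNat = g.toNat by omega]
    simp only [gt_iff_lt, Int.natCast_pos, List.countP_pos_iff, beq_iff_eq, exists_eq_right]
  have hiff : (∀ j ∈ PySem.List.pyRange 0 g 1, ¬ (PySem.List.pyGetD cs (i + j) '?' = '.'))
      ↔ ¬ ('.' ∈ (cs.drop i.toNat).take g.toNat) := by
    rw [pvMem_window cs '.' i g (by omega)]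
    push_neg
    constructor
    · intro hall j hj0 hjg
      have hb := hall j (PySem.List.mem_pyRange_one.mpr ⟨hj0, hjg⟩)
      rw [PySem.List.pyGetD_eq_getElem cs '?' (by omega) (by push_cast; omega)] at hb
      intro hsome
      obtain ⟨hlt, heq⟩ := List.getElem?_eq_some_iff.mp hsome
      exact hb heq
    · intro hnone j hj
      obtain ⟨hj0, hjg⟩ := PySem.List.mem_pyRange_one.mp hj
      rw [PySem.List.pyGetD_eq_getElem cs '?' (by omega) (by push_cast; omega)]
      intro heq
      exact hnone j hj0 hjg (by
        rw [List.getElem?_eq_getElem (by push_cast at hjg ⊢; omega)]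
        exact congrArg some heq)
  by_cases h1 : '#' ∈ PySem.List.slice cs (some position) (some i)
  · rw [if_pos h1, if_pos (hcond1.mp h1)]
  · rw [if_neg h1, if_neg (fun hh => h1 (hcond1.mpr hh))]
    by_cases h2 : i > 0 ∧ PySem.List.pyGetD cs (i - 1) '?' = '#'
    · rw [if_pos h2, if_pos h2]
    · rw [if_neg h2, if_neg h2]
      by_cases h3 : '.' ∈ (cs.drop i.toNat).take g.toNat
      · rw [if_pos (hcond3.mpr h3)]
        have hfalse : (pvAInner cs i (PySem.List.pyRange 0 g 1) (-1)).1 = false := by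
          rw [← Bool.not_eq_true, pvAInner_true_iff]
          intro hall
          exact (hiff.mp hall) h3
        simp only [hfalse, Bool.false_eq_true, if_false]
      · rw [if_neg (fun hh => h3 (hcond3.mp hh))]
        have hall := hiff.mpr h3
        have hrange : PySem.List.pyRange 0 g 1 = PySem.List.pyRange 0 (g - 1) 1 ++ [g - 1] := by
          have h := PySem.List.pyRange_one_succ_right (a := 0) (b := g - 1) (by omega)
          rw [sub_add_cancel] at h
          exact h
        have hr : pvAInner cs i (PySem.List.pyRange 0 g 1) (-1) = (true, g - 1) := by
          rw [pvAInner_all cs i _ _ hall, hrange, List.getLastD_concat]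
        simp only [hr, if_true]
        by_cases h4 : i + g = (cs.length : Int)
        · rw [if_pos (by omega), if_neg (by omega)]
        · rw [if_neg (by omega)]
          rw [show i + (g - 1) + 1 = i + g by ring]
          by_cases h5 : PySem.List.pyGetD cs (i + g) '?' = '#'
          · rw [if_neg (by simpa using h5), if_pos ⟨by omega, h5⟩]
          · rw [if_pos h5, if_neg (fun hh => h5 hh.2)]

-- ===== VERDICT (by name: the statement is the Claim_ definition above) =====
theorem get_group_start_positions_spec : Claim_equal_get_group_start_positions := by
  intro depth position line groups _ hpre
  unfold Spec_get_group_start_positions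
  obtain ⟨hp0, hrest⟩ := hpre
  simp only [get_group_start_positions, get_group_start_positions_alt]
  by_cases hpos : position ≥ (line.toList.length : Int)
  · rw [if_pos hpos, if_pos hpos]
  · rcases hrest with hbig | ⟨hd0, hdlen, hall⟩
    · omega
    rw [if_neg hpos, if_neg hpos]
    rw [PySem.List.slice_from groups hd0]
    obtain ⟨r0, rest, hcons⟩ := List.exists_cons_of_ne_nil
      (show groups.drop depth.toNat ≠ [] by
        intro hnil
        have := congrArg List.length hnil
        simp [List.length_drop] at this
        omega)
    rw [hcons]
    rw [PySem.List.pyGetD_zero_cons]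
    have hg1 : 1 ≤ r0 := hall r0 (by rw [hcons]; exact List.mem_cons_self)
    have hsum : (rest.length : Int) ≤ rest.sum :=
      pvLen_le_sum rest (fun y hy => hall y (by rw [hcons]; exact List.mem_cons_of_mem _ hy))
    apply PySem.List.foldl_congr_mem
    intro acc x hx
    obtain ⟨hlo, hhi⟩ := PySem.List.mem_pyRange_neg_one.mp hx
    exact pvBody_eq line.toList position r0 x acc hp0 (by omega) hg1 (by
      simp only [List.sum_cons, List.length_cons] at hhi
      push_cast at hhi ⊢
      omega)
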